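-- pv_equiv track=rewrite | github.com/nanohana-team/Local-Small-Language-Model | src/apps/run_minimal_chat.py | _build_length_index
-- ===== SOURCE A (Python) =====
-- from typing import Any, Dict, Iterable, List, Optional, Sequence, Tuple
--
-- def _build_length_index(words: Iterable[str]) -> Dict[int, set[str]]:
--     index: Dict[int, set[str]] = {}
--     for word in words:
--         w = str(word).strip()
--         if not w:
--             continue
--         index.setdefault(len(w), set()).add(w)
--     return index
-- ===== SOURCE B (Python) =====
-- def _build_length_index(words):
--     cleaned = [w for w in (str(word).strip() for word in words) if w]
--     return {n: {w for w in cleaned if len(w) == n}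
--             for n in dict.fromkeys(len(w) for w in cleaned)}
-- ===== Notes on version B (the rewrite author's own statement) =====
-- stated objective: alternative
-- what changed: Replaces A's single-pass incremental dict mutation (setdefault+in-place set.add per word) by a two-phase decomposition: first build the cleaned word list, then construct the whole index with a dict comprehension over the first-occurrence-ordered distinct lengths, one set comprehension per length.
import Mathlib
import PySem

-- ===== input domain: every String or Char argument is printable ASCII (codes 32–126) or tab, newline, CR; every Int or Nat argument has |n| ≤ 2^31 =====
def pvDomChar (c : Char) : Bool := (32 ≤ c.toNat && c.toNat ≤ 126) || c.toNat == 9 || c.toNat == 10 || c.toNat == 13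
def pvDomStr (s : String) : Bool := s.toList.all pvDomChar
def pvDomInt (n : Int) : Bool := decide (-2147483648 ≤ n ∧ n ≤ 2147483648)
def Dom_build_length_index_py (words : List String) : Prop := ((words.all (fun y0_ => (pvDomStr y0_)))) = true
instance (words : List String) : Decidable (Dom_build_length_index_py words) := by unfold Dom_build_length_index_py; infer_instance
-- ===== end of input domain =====

-- B replaces A's single-pass setdefault/add dict building by a clean-then-group-by-comprehension
-- decomposition (first-occurrence key order, one filter per distinct length); objective: alternative.

-- ===== PORT A =====
-- `index.setdefault(len(w), set()).add(w)` is exactly `Dict.modify (len w) ∅ (fun s => Set.add s w)`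
-- (absent key: insert default then add; present key: add in place, position kept).
def build_length_index_py (words : List String) : List (Int × List String) :=
  (words.foldl
    (fun (index : PySem.Dict Int (PySem.Set String)) word =>
      let w := PySem.Str.strip word
      if w = "" then index
      else PySem.Dict.modify index (PySem.Str.len w) PySem.Set.empty
             (fun s => PySem.Set.add s w))
    PySem.Dict.empty).items

-- ===== PORT B =====
def build_length_index_py_alt (words : List String) : List (Int × List String) :=
  let cleaned := (words.map (fun word => PySem.Str.strip word)).filter (fun w => w != "")
  (PySem.List.dedup (cleaned.map (fun w => PySem.Str.len w))).map
    (fun n => (n, PySem.Set.ofList (cleaned.filter (fun w => PySem.Str.len w == n))))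

-- ===== PRECONDITION & SPEC =====
def Spec_build_length_index_py (words : List String) (out : List (Int × List String)) : Prop := out = build_length_index_py_alt words
instance (words : List String) (out : List (Int × List String)) : Decidable (Spec_build_length_index_py words out) := by unfold Spec_build_length_index_py; infer_instance

-- ===== CLAIM (what is proved, stated in full; the proofs are below) =====
def Claim_equal_build_length_index_py : Prop := ∀ (words : List String), Dom_build_length_index_py words → Spec_build_length_index_py words (build_length_index_py words)

-- ===== LEMMAS AND PROOFS =====

-- A's loop skips exactly the words whose strip is empty: it is the same fold over the cleaned list.
theorem bli_fold_cleaned (words : List String) (d : PySem.Dict Int (PySem.Set String)) :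
    words.foldl
      (fun (index : PySem.Dict Int (PySem.Set String)) word =>
        let w := PySem.Str.strip word
        if w = "" then index
        else PySem.Dict.modify index (PySem.Str.len w) PySem.Set.empty
               (fun s => PySem.Set.add s w))
      d
    = ((words.map (fun word => PySem.Str.strip word)).filter (fun w => w != "")).foldl
        (fun (index : PySem.Dict Int (PySem.Set String)) w =>
          PySem.Dict.modify index (PySem.Str.len w) PySem.Set.empty
            (fun s => PySem.Set.add s w))
        d := by
  induction words generalizing d with
  | nil => rfl
  | cons x xs ih =>
    simp only [List.foldl_cons, List.map_cons, List.filter_cons]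
    by_cases h : PySem.Str.strip x = ""
    · simp only [h, bne_self_eq_false, Bool.false_eq_true, if_false, if_true, ih]
    · have hb : (PySem.Str.strip x != "") = true := by simp [h]
      simp only [if_neg h, hb, if_true, List.foldl_cons, ih]

-- The value stored at key n after the fold is the set of cleaned words of length n, in order.
theorem bli_getD_fold (l : List String) (d : PySem.Dict Int (PySem.Set String)) (n : Int) :
    (l.foldl
      (fun (index : PySem.Dict Int (PySem.Set String)) w =>
        PySem.Dict.modify index (PySem.Str.len w) PySem.Set.empty
          (fun s => PySem.Set.add s w))
      d).getD n PySem.Set.empty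
    = PySem.Set.update (d.getD n PySem.Set.empty)
        (l.filter (fun w => PySem.Str.len w == n)) := by
  induction l generalizing d with
  | nil => simp [PySem.Set.update_nil]
  | cons x xs ih =>
    simp only [List.foldl_cons, List.filter_cons, ih]
    by_cases h : PySem.Str.len x = n
    · subst h
      rw [PySem.Dict.getD_modify_self]
      simp only [beq_self_eq_true, if_true, PySem.Set.update_cons]
    · have hb : (PySem.Str.len x == n) = false := by
        simp only [beq_eq_false_iff_ne, ne_eq]; exact h
      simp only [hb, Bool.false_eq_true, if_false]
      rw [PySem.Dict.getD_modify, if_neg (fun he => h he.symm)]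

-- ===== VERDICT (by name: the statement is the Claim_ definition above) =====
theorem build_length_index_py_spec : Claim_equal_build_length_index_py := by
  intro words _
  show build_length_index_py words = build_length_index_py_alt words
  unfold build_length_index_py build_length_index_py_alt
  rw [bli_fold_cleaned]
  set cleaned := (words.map (fun word => PySem.Str.strip word)).filter (fun w => w != "") with hc
  set F := cleaned.foldl
      (fun (index : PySem.Dict Int (PySem.Set String)) w =>
        PySem.Dict.modify index (PySem.Str.len w) PySem.Set.empty
          (fun s => PySem.Set.add s w))
      PySem.Dict.empty with hF
  have hnd : F.keys.Nodup := by
    rw [hF]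
    exact PySem.Dict.nodup_keys_foldl_modify_key cleaned (fun w => PySem.Str.len w)
      PySem.Set.empty (fun d w => fun s => PySem.Set.add s w) PySem.Dict.empty
      PySem.Dict.nodup_keys_empty
  have hkeys : F.keys = PySem.List.dedup (cleaned.map (fun w => PySem.Str.len w)) := by
    rw [hF]
    rw [PySem.Dict.keys_foldl_modify_key cleaned (fun w => PySem.Str.len w)
      PySem.Set.empty (fun d w => fun s => PySem.Set.add s w) PySem.Dict.empty]
    simp [PySem.Dict.keys_empty, PySem.Set.update_nil_left]
  rw [PySem.Dict.items_eq_map_keys F hnd PySem.Set.empty, hkeys]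
  refine List.map_congr_left (fun n _ => ?_)
  rw [hF, bli_getD_fold]
  simp [PySem.Dict.getD_empty, PySem.Set.update_nil_left]
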